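-- pv_equiv track=rewrite | github.com/ziyi0218/plakoto-python-ai | archive/Interface_textuelle/Branche/correctif_002/it_v2.5_seed1.py | filter_max_pratique
-- ===== SOURCE A (Python) =====
-- def score_macro_move(macro_move):
--     """
--     Calcule la somme des distances de tous les micro coups, y compris bearing off.
--     Ex: (origine, destination, d).
--     - Si c'est un bearing off pour B => (origine,24), distance = 23-origine
--     - Pour N => (origine,-1), distance = origine-0
--     - Sinon => abs(destination-origine)
--     """
--     total = 0
--     for (o, dest, d) in macro_move:
--         if dest == 24:  # B sort
--             total += (24 - o)
--         elif dest == -1:  # N sort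
--             total += o + 1
--         else:
--             total += abs(dest - o)
--     return total
--
-- def filter_max_pratique(macro_dict):
--     """
--     macro_dict : { signature: [ [ (o,d,val), (o2,d2,val2),...], ... ] }
--     On calcule le score de chaque macro coup, on trouve le max, on ne garde que ceux = max.
--     """
--     filtered_dict = {}
--     max_score_global = 0
--
--     # 1) Trouver le score max
--     for sig, coups in macro_dict.items():
--         for coup in coups:
--             s = score_macro_move(coup)
--             if s > max_score_global:
--                 max_score_global = s
--
--     # 2) Filtrer
--     for sig, coups in macro_dict.items():
--         best_coups = []
--         for coup in coups:
--             s = score_macro_move(coup)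
--             if s == max_score_global:
--                 best_coups.append(coup)
--         if best_coups:
--             filtered_dict[sig] = best_coups
--
--     return filtered_dict
-- ===== SOURCE B (Python) =====
-- def score_macro_move(macro_move):
--     total = 0
--     for (o, dest, d) in macro_move:
--         if dest == 24:
--             total += (24 - o)
--         elif dest == -1:
--             total += o + 1
--         else:
--             total += abs(dest - o)
--     return total
--
-- def filter_max_pratique(macro_dict):
--     # Single pass with reset-on-new-max: keep the running max (floored at 0),
--     # the (sig, best_coups) entries collected so far, and the current sig's
--     # best list; a strictly greater score discards everything collected.
--     max_score_global = 0
--     kept = []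
--     for sig, coups in macro_dict.items():
--         best = []
--         for coup in coups:
--             s = score_macro_move(coup)
--             if s > max_score_global:
--                 max_score_global = s
--                 kept = []
--                 best = [coup]
--             elif s == max_score_global:
--                 best.append(coup)
--         if best:
--             kept.append((sig, best))
--     return dict(kept)
-- ===== Notes on version B (the rewrite author's own statement) =====
-- stated objective: alternative
-- what changed: B replaces A's two staged full passes (global max, then filter) by one online pass that keeps the running max and the entries scoring it, resetting the collected result whenever a strictly greater score appears, so each move is scored exactly once and no second traversal exists.
import Mathlib
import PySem

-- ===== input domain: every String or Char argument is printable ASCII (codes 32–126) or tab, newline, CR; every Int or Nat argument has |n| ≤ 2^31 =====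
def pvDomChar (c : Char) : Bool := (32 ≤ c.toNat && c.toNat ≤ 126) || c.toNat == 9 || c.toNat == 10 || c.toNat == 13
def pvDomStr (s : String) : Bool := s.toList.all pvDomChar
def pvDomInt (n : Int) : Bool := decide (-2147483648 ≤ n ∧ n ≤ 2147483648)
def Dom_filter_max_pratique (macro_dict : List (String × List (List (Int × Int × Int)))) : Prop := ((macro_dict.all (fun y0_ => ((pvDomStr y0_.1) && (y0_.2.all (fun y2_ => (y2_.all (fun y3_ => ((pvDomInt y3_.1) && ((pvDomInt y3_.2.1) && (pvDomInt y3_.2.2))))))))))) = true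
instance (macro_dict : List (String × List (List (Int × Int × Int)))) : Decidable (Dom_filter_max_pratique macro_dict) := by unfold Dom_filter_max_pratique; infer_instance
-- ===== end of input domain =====

-- B replaces A's two staged passes by one online pass over macro_dict that keeps the running max
-- and the entries scoring it, resetting the collection when a strictly greater score appears.
-- Objective: alternative (each move scored once, single traversal).


-- ===== PORT A =====
def score_macro_move (macro_move : List (Int × Int × Int)) : Int :=
  macro_move.foldl (fun total t =>
    if t.2.1 = 24 then total + (24 - t.1)
    else if t.2.1 = -1 then total + (t.1 + 1)
    else total + |t.2.1 - t.1|) 0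

def filter_max_pratique (macro_dict : List (String × List (List (Int × Int × Int)))) : List (String × List (List (Int × Int × Int))) :=
  -- 1) find the max score
  let max_score_global : Int := macro_dict.foldl (fun m e =>
    e.2.foldl (fun m coup =>
      let s := score_macro_move coup
      if s > m then s else m) m) 0
  -- 2) filter
  let filtered_dict : PySem.Dict String (List (List (Int × Int × Int))) :=
    macro_dict.foldl (fun fd e =>
      let best_coups := e.2.foldl (fun acc coup =>
        if score_macro_move coup = max_score_global then acc ++ [coup] else acc) []
      if best_coups ≠ [] then fd.insert e.1 best_coups else fd) PySem.Dict.empty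
  filtered_dict.items

-- ===== PORT B =====
def filter_max_pratique_alt (macro_dict : List (String × List (List (Int × Int × Int)))) : List (String × List (List (Int × Int × Int))) :=
  -- one pass: running max (floored at 0), kept (sig, best) entries, current sig's best list;
  -- a strictly greater score resets both kept and best
  let st : Int × List (String × List (List (Int × Int × Int))) :=
    macro_dict.foldl (fun st e =>
      let inner : Int × List (String × List (List (Int × Int × Int))) × List (List (Int × Int × Int)) :=
        e.2.foldl (fun st coup =>
          let s := score_macro_move coup
          if s > st.1 then (s, [], [coup])
          else if s = st.1 then (st.1, st.2.1, st.2.2 ++ [coup])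
          else st) (st.1, st.2, [])
      if inner.2.2 ≠ [] then (inner.1, inner.2.1 ++ [(e.1, inner.2.2)])
      else (inner.1, inner.2.1)) (0, [])
  (st.2.foldl (fun (fd : PySem.Dict String (List (List (Int × Int × Int)))) p => fd.insert p.1 p.2) PySem.Dict.empty).items

-- ===== PRECONDITION & SPEC =====
def Spec_filter_max_pratique (macro_dict : List (String × List (List (Int × Int × Int)))) (out : List (String × List (List (Int × Int × Int)))) : Prop := out = filter_max_pratique_alt macro_dict
instance (macro_dict : List (String × List (List (Int × Int × Int)))) (out : List (String × List (List (Int × Int × Int)))) : Decidable (Spec_filter_max_pratique macro_dict out) := by unfold Spec_filter_max_pratique; infer_instance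

-- ===== CLAIM =====
def Claim_equal_filter_max_pratique : Prop := ∀ (macro_dict : List (String × List (List (Int × Int × Int)))), Dom_filter_max_pratique macro_dict → Spec_filter_max_pratique macro_dict (filter_max_pratique macro_dict)

-- ===== LEMMAS AND PROOFS =====

-- abbreviations for the proofs (below the claim block; the ports do not use them)
def innerMax (coups : List (List (Int × Int × Int))) (m : Int) : Int :=
  coups.foldl (fun m coup =>
    let s := score_macro_move coup
    if s > m then s else m) m

def outerMax (l : List (String × List (List (Int × Int × Int)))) (m : Int) : Int :=
  l.foldl (fun m e => innerMax e.2 m) m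

def keptOf (M : Int) (l : List (String × List (List (Int × Int × Int)))) :
    List (String × List (List (Int × Int × Int))) :=
  l.filterMap (fun e =>
    let b := e.2.filter (fun coup => score_macro_move coup = M)
    if b = [] then none else some (e.1, b))

theorem innerMax_ge (coups : List (List (Int × Int × Int))) (m : Int) : m ≤ innerMax coups m := by
  induction coups generalizing m with
  | nil => simp [innerMax]
  | cons c t ih =>
    simp only [innerMax, List.foldl_cons]
    refine le_trans ?_ (ih _)
    dsimp only
    split <;> omega

theorem outerMax_ge (l : List (String × List (List (Int × Int × Int)))) (m : Int) : m ≤ outerMax l m := by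
  induction l generalizing m with
  | nil => simp [outerMax]
  | cons e t ih =>
    simp only [outerMax, List.foldl_cons]
    exact le_trans (innerMax_ge e.2 m) (ih _)

theorem score_le_innerMax (coups : List (List (Int × Int × Int))) (m : Int)
    (c : List (Int × Int × Int)) (hc : c ∈ coups) : score_macro_move c ≤ innerMax coups m := by
  induction coups generalizing m with
  | nil => cases hc
  | cons c' t ih =>
    simp only [innerMax, List.foldl_cons]
    rcases List.mem_cons.mp hc with h | h
    · subst h
      refine le_trans ?_ (innerMax_ge t _)
      dsimp only; split <;> omega
    · exact ih _ h

-- one-pass characterisation of B's inner loop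
theorem inner_char (coups : List (List (Int × Int × Int))) (m0 : Int)
    (f0 : List (String × List (List (Int × Int × Int)))) (b0 : List (List (Int × Int × Int))) :
    coups.foldl (fun st coup =>
      let s := score_macro_move coup
      if s > st.1 then (s, ([] : List (String × List (List (Int × Int × Int)))), [coup])
      else if s = st.1 then (st.1, st.2.1, st.2.2 ++ [coup])
      else st) (m0, f0, b0)
    = (innerMax coups m0,
       (if innerMax coups m0 = m0 then f0 else []),
       (if innerMax coups m0 = m0 then b0 else []) ++
         coups.filter (fun coup => score_macro_move coup = innerMax coups m0)) := by
  induction coups generalizing m0 f0 b0 with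
  | nil => simp [innerMax]
  | cons c t ih =>
    have hM : ∀ m, m ≤ innerMax t m := fun m => innerMax_ge t m
    simp only [List.foldl_cons]
    by_cases h1 : score_macro_move c > m0
    · rw [if_pos h1, ih]
      have hstep : innerMax (c :: t) m0 = innerMax t (score_macro_move c) := by
        simp [innerMax, h1]
      have hge := hM (score_macro_move c)
      have hne : innerMax t (score_macro_move c) ≠ m0 := by omega
      rw [hstep]
      by_cases h2 : innerMax t (score_macro_move c) = score_macro_move c
      · simp [h2]
        exact ⟨fun h => absurd h (by omega), fun h => absurd h (by omega)⟩
      · have hcn : ¬ (score_macro_move c = innerMax t (score_macro_move c)) := fun h => h2 h.symm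
        simp [hne, h2, hcn]
    · rw [if_neg h1]
      by_cases h2 : score_macro_move c = m0
      · rw [if_pos h2]
        rw [ih]
        have hstep : innerMax (c :: t) m0 = innerMax t m0 := by
          simp [innerMax, h1]
        rw [hstep]
        by_cases h3 : innerMax t m0 = m0
        · have : score_macro_move c = innerMax t m0 := by omega
          simp [h3, this]
        · have : score_macro_move c ≠ innerMax t m0 := by
            have := hM m0; omega
          simp [h3, this]
      · rw [if_neg h2]
        rw [ih]
        have hstep : innerMax (c :: t) m0 = innerMax t m0 := by
          simp [innerMax, h1]
        have : score_macro_move c ≠ innerMax t m0 := by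
          have := hM m0; omega
        rw [hstep]
        simp [this]

-- one-pass characterisation of B's outer loop
theorem outer_char (l : List (String × List (List (Int × Int × Int)))) (m0 : Int)
    (f0 : List (String × List (List (Int × Int × Int)))) :
    l.foldl (fun st e =>
      let inner : Int × List (String × List (List (Int × Int × Int))) × List (List (Int × Int × Int)) :=
        e.2.foldl (fun st coup =>
          let s := score_macro_move coup
          if s > st.1 then (s, [], [coup])
          else if s = st.1 then (st.1, st.2.1, st.2.2 ++ [coup])
          else st) (st.1, st.2, [])
      if inner.2.2 ≠ [] then (inner.1, inner.2.1 ++ [(e.1, inner.2.2)])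
      else (inner.1, inner.2.1)) (m0, f0)
    = (outerMax l m0, (if outerMax l m0 = m0 then f0 else []) ++ keptOf (outerMax l m0) l) := by
  induction l generalizing m0 f0 with
  | nil => simp [outerMax, keptOf]
  | cons e t ih =>
    simp only [List.foldl_cons]
    rw [inner_char]
    have hge1 : m0 ≤ innerMax e.2 m0 := innerMax_ge e.2 m0
    have hge2 : innerMax e.2 m0 ≤ outerMax t (innerMax e.2 m0) := outerMax_ge t _
    have hstep : outerMax (e :: t) m0 = outerMax t (innerMax e.2 m0) := by
      simp [outerMax, innerMax]
    have hkept : ∀ M : Int, keptOf M (e :: t)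
        = (if e.2.filter (fun coup => score_macro_move coup = M) = []
           then [] else [(e.1, e.2.filter (fun coup => score_macro_move coup = M))]) ++ keptOf M t := by
      intro M
      simp only [keptOf, List.filterMap_cons]
      by_cases h : e.2.filter (fun coup => score_macro_move coup = M) = []
      · simp [h]
      · simp [h]
    set M1 := innerMax e.2 m0 with hM1
    by_cases hB : e.2.filter (fun coup => score_macro_move coup = M1) = []
    · rw [if_neg (by simp [hB])]
      dsimp only
      rw [ih, hstep, hkept]
      by_cases hMeq : outerMax t M1 = M1
      · rw [hMeq, hB]
        by_cases hm : M1 = m0 <;> simp [hm]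
      · have hlt : M1 < outerMax t M1 := lt_of_le_of_ne hge2 (fun h => hMeq h.symm)
        have hne0 : outerMax t M1 ≠ m0 := by omega
        have hhead : e.2.filter (fun coup => score_macro_move coup = outerMax t M1) = [] := by
          apply List.filter_eq_nil_iff.mpr
          intro c hc
          have := score_le_innerMax e.2 m0 c hc
          rw [← hM1] at this
          simp only [decide_eq_true_eq]
          omega
        simp [hhead, hMeq, hne0]
    · rw [if_pos (by simp [hB])]
      dsimp only
      rw [ih, hstep, hkept]
      by_cases hMeq : outerMax t M1 = M1
      · rw [hMeq, if_neg hB]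
        by_cases hm : M1 = m0 <;> simp [hm, List.append_assoc]
      · have hlt : M1 < outerMax t M1 := lt_of_le_of_ne hge2 (fun h => hMeq h.symm)
        have hne0 : outerMax t M1 ≠ m0 := by omega
        have hhead : e.2.filter (fun coup => score_macro_move coup = outerMax t M1) = [] := by
          apply List.filter_eq_nil_iff.mpr
          intro c hc
          have := score_le_innerMax e.2 m0 c hc
          rw [← hM1] at this
          simp only [decide_eq_true_eq]
          omega
        simp [hhead, hMeq, hne0]

-- A's conditional-insert fold over l equals the plain-insert fold over keptOf M l
theorem cond_fold_eq_kept (M : Int) (l : List (String × List (List (Int × Int × Int))))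
    (fd : PySem.Dict String (List (List (Int × Int × Int)))) :
    l.foldl (fun fd e =>
      let best_coups := e.2.filter (fun coup => score_macro_move coup = M)
      if best_coups ≠ [] then fd.insert e.1 best_coups else fd) fd
    = (keptOf M l).foldl (fun fd p => fd.insert p.1 p.2) fd := by
  induction l generalizing fd with
  | nil => simp [keptOf]
  | cons e t ih =>
    by_cases h : e.2.filter (fun coup => score_macro_move coup = M) = []
    · have h1 : keptOf M (e :: t) = keptOf M t := by
        simp only [keptOf]
        exact List.filterMap_cons_none (by simp [h])
      rw [List.foldl_cons, if_neg (fun hc => hc h), h1]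
      exact ih fd
    · have h1 : keptOf M (e :: t)
          = (e.1, e.2.filter (fun coup => score_macro_move coup = M)) :: keptOf M t := by
        simp only [keptOf]
        exact List.filterMap_cons_some (by simp [h])
      rw [List.foldl_cons, if_pos h, h1, List.foldl_cons]
      exact ih _

theorem filter_max_pratique_eq (macro_dict : List (String × List (List (Int × Int × Int)))) :
    filter_max_pratique macro_dict = filter_max_pratique_alt macro_dict := by
  unfold filter_max_pratique filter_max_pratique_alt
  rw [outer_char]
  dsimp only
  congr 1
  rw [show (macro_dict.foldl (fun m e =>
      e.2.foldl (fun m coup =>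
        let s := score_macro_move coup
        if s > m then s else m) m) 0) = outerMax macro_dict 0 from rfl]
  have hbest : ∀ (coups : List (List (Int × Int × Int))) (M : Int),
      coups.foldl (fun acc coup =>
        if score_macro_move coup = M then acc ++ [coup] else acc) []
      = coups.filter (fun coup => score_macro_move coup = M) := by
    intro coups M
    rw [PySem.List.foldl_append_ite_eq_filter]
    simp
  calc (macro_dict.foldl (fun fd e =>
          let best_coups := e.2.foldl (fun acc coup =>
            if score_macro_move coup = outerMax macro_dict 0 then acc ++ [coup] else acc) []
          if best_coups ≠ [] then fd.insert e.1 best_coups else fd) PySem.Dict.empty)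
      = macro_dict.foldl (fun fd e =>
          let best_coups := e.2.filter (fun coup => score_macro_move coup = outerMax macro_dict 0)
          if best_coups ≠ [] then fd.insert e.1 best_coups else fd) PySem.Dict.empty := by
        apply PySem.List.foldl_congr_mem
        intro fd e _
        dsimp only
        rw [hbest]
    _ = _ := by
        rw [cond_fold_eq_kept]
        simp

-- ===== VERDICT =====
theorem filter_max_pratique_spec : Claim_equal_filter_max_pratique := by
  intro md _
  exact filter_max_pratique_eq md
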